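-- pv_equiv track=rewrite | github.com/Jeong-Siku/TIL | 프로그래머스/unrated/181887. 홀수 vs 짝수/홀수 vs 짝수.py | solution
-- ===== SOURCE A (Python) =====
-- def solution(num_list):
--     answer = 0
--     odd = 0
--     even = 0
--     for i in range(len(num_list)):
--         if i%2:
--             even+=num_list[i]
--         else:
--             odd+=num_list[i]
--     return max(even,odd)
-- ===== SOURCE B (Python) =====
-- def solution(num_list):
--     odd_sum = sum(num_list[0::2])   # elements at even indices
--     even_sum = sum(num_list[1::2])  # elements at odd indices
--     return max(even_sum, odd_sum)
-- ===== Notes on version B (the rewrite author's own statement) =====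
-- stated objective: idiomatic
-- what changed: Replaces the indexed loop with an i%2 branch by two stride-2 slice sums (sum(num_list[0::2]) and sum(num_list[1::2])) and a final max.
import Mathlib
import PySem

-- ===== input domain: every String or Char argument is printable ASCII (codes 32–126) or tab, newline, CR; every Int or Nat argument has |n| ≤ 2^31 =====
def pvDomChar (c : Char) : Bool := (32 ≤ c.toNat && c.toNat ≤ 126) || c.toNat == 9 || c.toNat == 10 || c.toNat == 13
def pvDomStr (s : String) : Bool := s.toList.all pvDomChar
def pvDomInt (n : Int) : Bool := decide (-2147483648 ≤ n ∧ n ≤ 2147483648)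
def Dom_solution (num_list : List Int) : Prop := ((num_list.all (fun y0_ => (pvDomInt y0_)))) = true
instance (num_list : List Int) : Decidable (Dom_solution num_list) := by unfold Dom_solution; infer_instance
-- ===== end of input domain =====

-- B replaces A's indexed loop with an i%2 branch by two stride-2 slice sums; same O(n) cost, more idiomatic.

-- ===== PORT A =====
-- A's state: 'even' accumulates odd-index elements, 'odd' even-index ones (A's own naming); result max(even, odd)
def solution (num_list : List Int) : Int :=
  let s := (PySem.List.pyRange 0 (num_list.length : Int) 1).foldl
    (fun (st : Int × Int) i =>
      if PySem.Int.mod i 2 ≠ 0 then (st.1 + PySem.List.pyGetD num_list i 0, st.2)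
      else (st.1, st.2 + PySem.List.pyGetD num_list i 0)) (0, 0)
  max s.1 s.2

-- ===== PORT B =====
-- Source B: odd_sum = sum(num_list[0::2]); even_sum = sum(num_list[1::2]); max(even_sum, odd_sum)
def solution_alt (num_list : List Int) : Int :=
  let odd_sum := ((PySem.List.slice? num_list (some 0) none 2).getD []).sum
  let even_sum := ((PySem.List.slice? num_list (some 1) none 2).getD []).sum
  max even_sum odd_sum

-- ===== PRECONDITION & SPEC =====
def Spec_solution (num_list : List Int) (out : Int) : Prop := out = solution_alt num_list
instance (num_list : List Int) (out : Int) : Decidable (Spec_solution num_list out) := by unfold Spec_solution; infer_instance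

-- ===== CLAIM (what is proved, stated in full; the proofs are below) =====
def Claim_equal_solution : Prop := ∀ (num_list : List Int), Dom_solution num_list → Spec_solution num_list (solution num_list)

-- ===== LEMMAS AND PROOFS =====

def pvEvens : List Int → List Int
  | [] => []
  | [x] => [x]
  | x :: _ :: xs => x :: pvEvens xs

def pvOdds (xs : List Int) : List Int := pvEvens xs.tail

theorem pvFM_evens (xs : List Int) :
    (List.range ((xs.length + 1) / 2)).filterMap (fun k => xs[2 * k]?) = pvEvens xs := by
  induction xs using pvEvens.induct with
  | case1 => simp [pvEvens]
  | case2 x => simp [pvEvens, List.range_succ]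
  | case3 x y xs ih =>
      have hc : ((x :: y :: xs).length + 1) / 2 = (xs.length + 1) / 2 + 1 := by
        simp; omega
      rw [hc, List.range_succ_eq_map, List.filterMap_cons, List.filterMap_map]
      have h0 : (x :: y :: xs)[2 * 0]? = some x := by norm_num
      rw [h0]
      have hfun : ((fun k => (x :: y :: xs)[2 * k]?) ∘ (fun n => n + 1))
          = fun k : Nat => xs[2 * k]? := by
        funext k
        simp [Function.comp, Nat.mul_add]
      rw [hfun, ih, pvEvens]

theorem pvSlice0 (xs : List Int) :
    PySem.List.slice? xs (some 0) none 2 = some (pvEvens xs) := by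
  rw [← pvFM_evens xs]
  simp only [PySem.List.slice?, PySem.List.sliceIndices]
  norm_num
  have hcount : (if 0 < xs.length then (((xs.length : Int) + 2 - 1) / 2).toNat else 0)
      = (xs.length + 1) / 2 := by split_ifs <;> omega
  rw [hcount]
  have hfun : (fun x : Nat => xs[((2 : Int) * (x : Nat)).toNat]?) = fun k : Nat => xs[2 * k]? := by
    funext k
    have h2 : ((2 : Int) * (k : Nat)).toNat = 2 * k := by omega
    rw [h2]
  rw [hfun]

theorem pvEvens_cons (x : Int) (xs : List Int) : pvEvens (x :: xs) = x :: pvOdds xs := by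
  cases xs <;> simp [pvEvens, pvOdds]

theorem pvFM_odds (xs : List Int) :
    (List.range (xs.length / 2)).filterMap (fun k => xs[2 * k + 1]?) = pvOdds xs := by
  induction xs using pvEvens.induct with
  | case1 => simp [pvOdds, pvEvens]
  | case2 x => simp [pvOdds, pvEvens]
  | case3 x y xs ih =>
      have hc : (x :: y :: xs).length / 2 = xs.length / 2 + 1 := by simp; omega
      rw [hc, List.range_succ_eq_map, List.filterMap_cons, List.filterMap_map]
      have h0 : (x :: y :: xs)[2 * 0 + 1]? = some y := by norm_num
      rw [h0]
      have hfun : ((fun k => (x :: y :: xs)[2 * k + 1]?) ∘ (fun n => n + 1))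
          = fun k : Nat => xs[2 * k + 1]? := by
        funext k
        simp [Function.comp, Nat.mul_add]
      rw [hfun, ih]
      show _ = pvEvens (y :: xs)
      rw [pvEvens_cons]

theorem pvSlice1 (xs : List Int) :
    PySem.List.slice? xs (some 1) none 2 = some (pvOdds xs) := by
  rw [← pvFM_odds xs]
  simp only [PySem.List.slice?, PySem.List.sliceIndices]
  norm_num
  by_cases h : 1 < xs.length
  · have hm : min (1 : Int) (xs.length : Int) = 1 := by omega
    simp only [hm, if_pos h]
    have hcount : (((xs.length : Int) - 1 + 2 - 1) / 2).toNat = xs.length / 2 := by omega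
    rw [hcount]
    have hfun : (fun x : Nat => xs[((1 : Int) + 2 * (x : Nat)).toNat]?) = fun k : Nat => xs[2 * k + 1]? := by
      funext k
      have h2 : ((1 : Int) + 2 * (k : Nat)).toNat = 2 * k + 1 := by omega
      rw [h2]
    rw [hfun]
  · rw [if_neg h]
    have hl : xs.length / 2 = 0 := by omega
    rw [hl]
    simp

def pvF (ys : List Int) : Int × Int → Int → Int × Int :=
  fun st i =>
    if PySem.Int.mod i 2 ≠ 0 then (st.1 + PySem.List.pyGetD ys i 0, st.2)
    else (st.1, st.2 + PySem.List.pyGetD ys i 0)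

theorem pvLoopA (ys : List Int) (d : Nat) : ∀ (j : Nat) (e o : Int),
    ys.length - j = d →
    (PySem.List.pyRange (j : Int) (ys.length : Int) 1).foldl (pvF ys) (e, o) =
      if j % 2 = 0 then (e + (pvOdds (ys.drop j)).sum, o + (pvEvens (ys.drop j)).sum)
      else (e + (pvEvens (ys.drop j)).sum, o + (pvOdds (ys.drop j)).sum) := by
  induction d with
  | zero =>
      intro j e o hd
      have hj : ys.length ≤ j := by omega
      rw [PySem.List.pyRange_one_eq_nil (by exact_mod_cast hj)]
      rw [List.drop_eq_nil_of_le hj]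
      split_ifs <;> simp [pvEvens, pvOdds]
  | succ d ih =>
      intro j e o hd
      have hj : j < ys.length := by omega
      rw [PySem.List.pyRange_one_cons (by exact_mod_cast hj)]
      rw [List.foldl_cons, show ((j : Int) + 1) = ((j + 1 : Nat) : Int) by push_cast; ring]
      have hget : PySem.List.pyGetD ys (j : Int) 0 = ys[j] := by
        simp [PySem.List.pyGetD, PySem.List.pyGet?, PySem.List.pyIdx?, hj]
      have hdrop : ys.drop j = ys[j] :: ys.drop (j + 1) := by
        exact (List.getElem_cons_drop hj).symm
      have hmod : PySem.Int.mod (j : Int) 2 = ((j % 2 : Nat) : Int) := by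
        rw [PySem.Int.mod, Int.fmod_eq_emod]
        simp only [if_pos (Or.inl (by norm_num : (0:Int) ≤ 2))]
        omega
      rcases Nat.even_or_odd j with hpar | hpar
      · have h0 : j % 2 = 0 := Nat.even_iff.mp hpar
        have h1 : (j + 1) % 2 = 1 := by omega
        have hbody : pvF ys (e, o) (j : Int) = (e, o + ys[j]) := by
          simp only [pvF, hmod, h0, hget]
          norm_num
        rw [hbody, ih (j + 1) e (o + ys[j]) (by omega)]
        rw [if_pos h0, if_neg (by omega : ¬ (j + 1) % 2 = 0)]
        rw [hdrop, pvEvens_cons]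
        have hodds : pvOdds (ys[j] :: ys.drop (j + 1)) = pvEvens (ys.drop (j + 1)) := rfl
        rw [hodds]
        simp
        ring
      · have h0 : j % 2 = 1 := Nat.odd_iff.mp hpar
        have hbody : pvF ys (e, o) (j : Int) = (e + ys[j], o) := by
          simp only [pvF, hmod, h0, hget]
          norm_num
        rw [hbody, ih (j + 1) (e + ys[j]) o (by omega)]
        rw [if_neg (by omega : ¬ j % 2 = 0), if_pos (by omega : (j + 1) % 2 = 0)]
        rw [hdrop, pvEvens_cons]
        have hodds : pvOdds (ys[j] :: ys.drop (j + 1)) = pvEvens (ys.drop (j + 1)) := rfl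
        rw [hodds]
        simp
        ring

theorem pvSolutionA (xs : List Int) :
    solution xs = max (pvOdds xs).sum (pvEvens xs).sum := by
  unfold solution
  have h := pvLoopA xs xs.length 0 0 0 (by omega)
  simp only [Nat.cast_zero, List.drop_zero, Nat.zero_mod, zero_add] at h
  rw [if_true] at h
  show max ((PySem.List.pyRange 0 (xs.length : Int) 1).foldl (pvF xs) (0, 0)).1
      ((PySem.List.pyRange 0 (xs.length : Int) 1).foldl (pvF xs) (0, 0)).2 = _
  rw [h]

theorem pvSolutionB (xs : List Int) :
    solution_alt xs = max (pvOdds xs).sum (pvEvens xs).sum := by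
  unfold solution_alt
  rw [pvSlice0, pvSlice1]
  simp

-- ===== VERDICT (by name: the statement is the Claim_ definition above) =====
theorem solution_spec : Claim_equal_solution := by
  intro xs _
  unfold Spec_solution
  rw [pvSolutionA, pvSolutionB]
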